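-- pv_equiv track=rewrite | github.com/rodrigomelopinto/IST-LEIC-A | FP/P1/P1.py | posicoes_adjacentes
-- ===== SOURCE A (Python) =====
-- def eh_posicao(pos):
--
--  """Funcao que recebe um argumento e retorna True se\
--  esse argumento for uma posicao valida"""
--
--  if not isinstance (pos,tuple):
--                  return False
--  if len(pos) != 2:
--                  return False
--  for i in pos:
--                  if not type(i) == int:
--                                  return False
--                  if  i < 0:
--                                  return False
--  return True
--
-- def posicoes_adjacentes(pos):
--
--  """Funcao que recebe como argumento uma posicao e retorna\
--  um tuplo correspondente as posicoes adjacentes a essa posicao"""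
--
--  pos_adj1 = ()
--  pos_adj2 = ()
--  pos_adj3 = ()
--  pos_adj4 = ()
--  if not eh_posicao(pos):
--                  raise ValueError ('posicoes_adjacentes: argumento invalido')
--  for i in range(len(pos)):
--                  if pos[0] == 0 and pos[-1] != 0:
--                                  pos_adj1 = ((pos[0],pos[-1]-1),) + pos_adj1
--                                  pos_adj3 = ((pos[0]+1,pos[-1]),) + pos_adj3
--                                  pos_adj4 = ((pos[0],pos[-1]+1),) + pos_adj4
--                                  return pos_adj1 + pos_adj3 + pos_adj4
--                  elif pos[0] != 0 and pos[-1] == 0: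
--                                  pos_adj2 = ((pos[0]-1,pos[-1]),) + pos_adj2
--                                  pos_adj3 = ((pos[0]+1,pos[-1]),) + pos_adj3
--                                  pos_adj4 = ((pos[0],pos[-1]+1),) + pos_adj4
--                                  return pos_adj2 + pos_adj3 + pos_adj4
--                  elif pos[0] == 0 and pos[-1] == 0:
--                                  pos_adj3 = ((pos[0]+1,pos[-1]),) + pos_adj3
--                                  pos_adj4 = ((pos[0],pos[-1]+1),) + pos_adj4
--                                  return pos_adj3 + pos_adj4
--                  elif pos[0] != 0 and pos[-1] != 0:
--                                  pos_adj1 = ((pos[0],pos[-1]-1),) + pos_adj1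
--                                  pos_adj2 = ((pos[0]-1,pos[-1]),) + pos_adj2
--                                  pos_adj3 = ((pos[0]+1,pos[-1]),) + pos_adj3
--                                  pos_adj4 = ((pos[0],pos[-1]+1),) + pos_adj4
--                                  return pos_adj1 + pos_adj2 + pos_adj3 + pos_adj4
-- ===== SOURCE B (Python) =====
-- def eh_posicao(pos):
--
--  """Funcao que recebe um argumento e retorna True se\
--  esse argumento for uma posicao valida"""
--
--  if not isinstance (pos,tuple):
--                  return False
--  if len(pos) != 2:
--                  return False
--  for i in pos:
--                  if not type(i) == int:
--                                  return False
--                  if  i < 0: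
--                                  return False
--  return True
--
-- def posicoes_adjacentes(pos):
--     if not eh_posicao(pos):
--         raise ValueError('posicoes_adjacentes: argumento invalido')
--     res = ()
--     for dr, dc in ((0, -1), (-1, 0), (1, 0), (0, 1)):
--         r, c = pos[0] + dr, pos[1] + dc
--         if r >= 0 and c >= 0:
--             res += ((r, c),)
--     return res
-- ===== Notes on version B (the rewrite author's own statement) =====
-- stated objective: idiomatic
-- what changed: Replaced the four-branch case enumeration with a single loop over a fixed delta table, appending each neighbour whose coordinates are both non-negative.
import Mathlib
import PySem

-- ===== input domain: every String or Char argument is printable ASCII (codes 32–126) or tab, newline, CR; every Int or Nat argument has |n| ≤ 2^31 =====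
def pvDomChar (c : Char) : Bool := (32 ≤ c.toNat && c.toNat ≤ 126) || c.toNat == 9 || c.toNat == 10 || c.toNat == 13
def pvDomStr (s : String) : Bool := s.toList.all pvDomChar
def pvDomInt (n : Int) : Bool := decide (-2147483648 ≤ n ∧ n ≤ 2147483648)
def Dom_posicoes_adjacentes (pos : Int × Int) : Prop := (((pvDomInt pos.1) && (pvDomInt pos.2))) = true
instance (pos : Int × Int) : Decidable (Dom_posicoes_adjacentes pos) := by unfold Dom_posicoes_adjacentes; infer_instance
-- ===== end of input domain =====

-- ===== PORT A =====
-- B replaces A's four-branch case enumeration by one loop over a fixed delta table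
-- with a `both coordinates ≥ 0` guard (objective: idiomatic). Pre_ excludes the
-- inputs on which A raises ValueError (a negative coordinate).
-- eh_posicao's tuple/length/type checks are vacuous for an (Int × Int) argument;
-- its coordinate check (raise on a negative coordinate) is exactly ¬Pre_ below.
def posicoes_adjacentes (pos : Int × Int) : List (Int × Int) :=
  -- A's loop body returns on its first iteration; the branches are transcribed in order
  if pos.1 == 0 && pos.2 != 0 then
    [(pos.1, pos.2 - 1)] ++ [(pos.1 + 1, pos.2)] ++ [(pos.1, pos.2 + 1)]
  else if pos.1 != 0 && pos.2 == 0 then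
    [(pos.1 - 1, pos.2)] ++ [(pos.1 + 1, pos.2)] ++ [(pos.1, pos.2 + 1)]
  else if pos.1 == 0 && pos.2 == 0 then
    [(pos.1 + 1, pos.2)] ++ [(pos.1, pos.2 + 1)]
  else
    [(pos.1, pos.2 - 1)] ++ [(pos.1 - 1, pos.2)] ++ [(pos.1 + 1, pos.2)] ++ [(pos.1, pos.2 + 1)]

-- ===== PORT B =====
def posicoes_adjacentes_alt (pos : Int × Int) : List (Int × Int) :=
  [((0 : Int), (-1 : Int)), (-1, 0), (1, 0), (0, 1)].foldl
    (fun res d =>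
      let r := pos.1 + d.1
      let c := pos.2 + d.2
      if r ≥ 0 && c ≥ 0 then res ++ [(r, c)] else res)
    []

-- ===== PRECONDITION & SPEC =====
-- Pre_ excludes exactly the inputs on which A raises ValueError: a negative coordinate.
def Pre_posicoes_adjacentes (pos : Int × Int) : Prop := 0 ≤ pos.1 ∧ 0 ≤ pos.2
instance (pos : Int × Int) : Decidable (Pre_posicoes_adjacentes pos) := by
  unfold Pre_posicoes_adjacentes; infer_instance

def pvWitness_posicoes_adjacentes : (Int × Int) := (2, 3)

def Spec_posicoes_adjacentes (pos : Int × Int) (out : List (Int × Int)) : Prop := out = posicoes_adjacentes_alt pos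
instance (pos : Int × Int) (out : List (Int × Int)) : Decidable (Spec_posicoes_adjacentes pos out) := by unfold Spec_posicoes_adjacentes; infer_instance

-- ===== CLAIM (what is proved, stated in full; the proofs are below) =====
def Claim_equal_posicoes_adjacentes : Prop := ∀ (pos : Int × Int), Dom_posicoes_adjacentes pos → Pre_posicoes_adjacentes pos → Spec_posicoes_adjacentes pos (posicoes_adjacentes pos)

-- ===== LEMMAS AND PROOFS =====

-- ===== VERDICT (by name: the statement is the Claim_ definition above) =====
theorem posicoes_adjacentes_spec : Claim_equal_posicoes_adjacentes := by
  intro ⟨r, c⟩ _ ⟨hr, hc⟩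
  unfold Spec_posicoes_adjacentes posicoes_adjacentes posicoes_adjacentes_alt
  simp only [List.foldl]
  by_cases h1 : r = 0 <;> by_cases h2 : c = 0 <;>
    simp_all <;> split_ifs <;> simp_all <;> omega
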